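-- pv_equiv track=rewrite | github.com/00-hidan-00/Python_Intro | Homework_Lesson_9.py | crtNewList
-- ===== SOURCE A (Python) =====
-- def crtNewList(initial_list):
--     result = []
--     for index, symbol in enumerate(initial_list):
--         if index % 2 == 0:
--             result.append(symbol[::-1])
--         else:
--             result.append(symbol)
--     return result
-- ===== SOURCE B (Python) =====
-- def crtNewList(initial_list):
--     # copy, then overwrite only the even positions via a step-2 range
--     result = list(initial_list)
--     for i in range(0, len(initial_list), 2):
--         result[i] = initial_list[i][::-1]
--     return result
-- ===== Notes on version B (the rewrite author's own statement) =====
-- stated objective: idiomatic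
-- what changed: Replaces the enumerate loop with an index%2 branch by copying the list and overwriting only the even positions via a branch-free range(0, len, 2) write-back loop.
import Mathlib
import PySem

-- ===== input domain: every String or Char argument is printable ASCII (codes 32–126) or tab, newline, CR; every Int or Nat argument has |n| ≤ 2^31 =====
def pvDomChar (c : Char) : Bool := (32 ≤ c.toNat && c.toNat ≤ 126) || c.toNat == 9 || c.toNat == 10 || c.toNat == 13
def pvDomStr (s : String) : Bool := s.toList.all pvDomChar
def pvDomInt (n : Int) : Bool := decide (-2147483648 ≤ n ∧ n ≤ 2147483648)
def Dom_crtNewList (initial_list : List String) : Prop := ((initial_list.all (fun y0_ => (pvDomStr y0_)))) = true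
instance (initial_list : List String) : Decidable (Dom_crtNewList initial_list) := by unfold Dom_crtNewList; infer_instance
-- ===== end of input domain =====

-- B replaces A's enumerate loop with its index%2 branch by: copy the list, then overwrite only the even positions via a step-2 range (branch-free).


-- ===== PORT A =====
-- s[::-1] (never raises): PySem.Str.slice? with step -1 is exact; the getD default is never taken
def pyRev (s : String) : String := (PySem.Str.slice? s none none (-1)).getD s

def crtNewList (initial_list : List String) : List String :=
  (PySem.List.enumerate initial_list 0).foldl
    (fun result p =>
      if PySem.Int.mod p.1 2 == 0 then result ++ [pyRev p.2] else result ++ [p.2])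
    []

-- ===== PORT B =====
-- result = list(initial_list); for i in range(0, len, 2): result[i] = initial_list[i][::-1]
-- (indices from the range are always in bounds, so pySetD/pyGetD are exact here)
def crtNewList_alt (initial_list : List String) : List String :=
  (PySem.List.pyRange 0 initial_list.length 2).foldl
    (fun result i =>
      PySem.List.pySetD result i (pyRev (PySem.List.pyGetD initial_list i "")))
    initial_list

-- ===== PRECONDITION & SPEC =====
def Spec_crtNewList (initial_list : List String) (out : List String) : Prop := out = crtNewList_alt initial_list
instance (initial_list : List String) (out : List String) : Decidable (Spec_crtNewList initial_list out) := by unfold Spec_crtNewList; infer_instance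

-- ===== CLAIM (what is proved, stated in full; the proofs are below) =====
def Claim_equal_crtNewList : Prop := ∀ (initial_list : List String), Dom_crtNewList initial_list → Spec_crtNewList initial_list (crtNewList initial_list)

-- ===== LEMMAS AND PROOFS =====

-- A's append loop is a map over the enumeration
theorem crtNewList_eq_map (xs : List String) :
    crtNewList xs = (PySem.List.enumerate xs 0).map
      (fun p => if PySem.Int.mod p.1 2 == 0 then pyRev p.2 else p.2) := by
  unfold crtNewList
  have hfun : (fun (result : List String) (p : Int × String) =>
      if PySem.Int.mod p.1 2 == 0 then result ++ [pyRev p.2] else result ++ [p.2])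
      = (fun result p =>
          result ++ [if PySem.Int.mod p.1 2 == 0 then pyRev p.2 else p.2]) := by
    funext result p
    by_cases h : (2 : Int) ∣ p.1 <;> simp [h]
  rw [hfun, PySem.List.foldl_append_singleton_eq_map]
  simp

-- the invariant of B's write-back loop, stated with getElem?
theorem alt_go (xs : List String) :
    ∀ (l : List Int) (r : List String), r.length = xs.length →
      (∀ i ∈ l, 0 ≤ i ∧ i < (xs.length : Int)) →
      (l.foldl (fun result i =>
          PySem.List.pySetD result i (pyRev (PySem.List.pyGetD xs i ""))) r).length = xs.length ∧
      ∀ j : Nat,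
        (l.foldl (fun result i =>
            PySem.List.pySetD result i (pyRev (PySem.List.pyGetD xs i ""))) r)[j]?
          = if (j : Int) ∈ l then xs[j]?.map pyRev else r[j]? := by
  intro l
  induction l with
  | nil => intro r hr _; simp [hr]
  | cons i l ih =>
    intro r hr hmem
    obtain ⟨hi0, hilt⟩ := hmem i (List.mem_cons_self ..)
    have hitn : i.toNat < xs.length := by omega
    have hset : PySem.List.pySetD r i (pyRev (PySem.List.pyGetD xs i ""))
        = r.set i.toNat (pyRev (PySem.List.pyGetD xs i "")) :=
      PySem.List.pySetD_of_nonneg r _ hi0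
    have hlen' : (r.set i.toNat (pyRev (PySem.List.pyGetD xs i ""))).length = xs.length := by
      simp [hr]
    obtain ⟨hL, hG⟩ := ih (r.set i.toNat (pyRev (PySem.List.pyGetD xs i "")))
      hlen' (fun a ha => hmem a (List.mem_cons_of_mem _ ha))
    refine ⟨by simpa [hset] using hL, ?_⟩
    intro j
    rw [List.foldl_cons, hset, hG j]
    by_cases hjl : (j : Int) ∈ l
    · simp [hjl]
    · by_cases hji : (j : Int) = i
      · have hji' : i.toNat = j := by omega
        have hjlt : j < xs.length := by omega
        have hv : PySem.List.pyGetD xs i "" = xs[i.toNat] :=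
          PySem.List.pyGetD_eq_getElem xs "" hi0 (by omega)
        simp [hji, hji', hr, hjlt, hv]
      · have hne : i.toNat ≠ j := by omega
        simp [hjl, hji, hne]

theorem crtNewList_spec : Claim_equal_crtNewList := by
  intro xs _
  unfold Spec_crtNewList crtNewList_alt
  obtain ⟨hL, hG⟩ := alt_go xs (PySem.List.pyRange 0 xs.length 2) xs rfl
    (fun i hi => by
      have := (PySem.List.mem_pyRange_iff_of_pos (by omega) i).mp hi
      exact ⟨this.1, this.2.1⟩)
  rw [crtNewList_eq_map]
  apply List.ext_getElem?
  intro j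
  rw [hG j, List.getElem?_map, PySem.List.getElem?_enumerate]
  by_cases hj : j < xs.length
  · rw [List.getElem?_eq_getElem hj]
    have hmem : (j : Int) ∈ PySem.List.pyRange 0 (xs.length) 2
        ↔ (2 : Int) ∣ (j : Int) := by
      rw [PySem.List.mem_pyRange_iff_of_pos (by omega)]
      constructor
      · rintro ⟨-, -, h⟩; simpa using h
      · intro h; exact ⟨by omega, by omega, by simpa using h⟩
    by_cases hd : (2 : Int) ∣ (j : Int)
    · simp [hmem, hd]
    · simp [hmem, hd]
  · have : xs[j]? = none := by
      rw [List.getElem?_eq_none_iff]; omega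
    simp [this]
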